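-- pv_equiv track=rewrite | github.com/tomgxz/PokerAnalyser | main.py | twoPairScore
-- ===== SOURCE A (Python) =====
-- def getCardNumericValue(card):
--     if card[0] == "A":
--          return [14,card[1]]
--     if card[0] == "J":
--          return [11,card[1]]
--     if card[0] == "Q":
--          return [12,card[1]]
--     if card[0] == "K":
--          return [13,card[1]]
--     return [int(card[0]),card[1]]
--
-- def getSortedRanks(cards):
--     cards=[getCardNumericValue(c) for c in cards]
--     cards=[x[0] for x in cards]
--     cards.sort()
--     return cards
--
-- def twoPairScore(cards):
--     returnList=[]
--
--     cards=getSortedRanks(cards)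
--     cards.reverse()
--
--     for card in cards:
--         if cards.count(card) == 2:
--             returnList.append(card)
--             cards=[x for x in cards if x != card]
--
--     returnList.append(cards[0])
--
--     return returnList
-- ===== SOURCE B (Python) =====
-- def _rank(card):
--     c = card[0]
--     if c == "A": return 14
--     if c == "K": return 13
--     if c == "Q": return 12
--     if c == "J": return 11
--     return int(c)
--
-- def twoPairScore(cards):
--     ranks = sorted((_rank(c) for c in cards), reverse=True)
--     freq = {}
--     for v in ranks:
--         freq[v] = freq.get(v, 0) + 1
--     pairs = [v for v in freq if freq[v] == 2]
--     remaining = [v for v in ranks if freq[v] != 2]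
--     return pairs + [remaining[0]]
-- ===== Notes on version B (the rewrite author's own statement) =====
-- stated objective: simpler
-- what changed: A repeatedly counts and rebuilds the rank list while iterating over it (mutate-while-iterating quadratic scan); B builds one frequency table of the descending ranks and reads the pair ranks and the kicker list directly off it in single passes.
import Mathlib
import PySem

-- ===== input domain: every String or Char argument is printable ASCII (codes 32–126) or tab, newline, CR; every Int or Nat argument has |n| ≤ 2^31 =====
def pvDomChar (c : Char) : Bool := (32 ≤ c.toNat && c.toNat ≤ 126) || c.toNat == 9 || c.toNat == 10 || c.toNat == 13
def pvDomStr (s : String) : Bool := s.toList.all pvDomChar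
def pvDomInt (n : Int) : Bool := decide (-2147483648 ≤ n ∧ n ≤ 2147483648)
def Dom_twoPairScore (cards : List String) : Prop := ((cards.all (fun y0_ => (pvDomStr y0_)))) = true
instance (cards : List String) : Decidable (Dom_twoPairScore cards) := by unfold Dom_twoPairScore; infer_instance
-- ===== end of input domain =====

-- B replaces A's quadratic mutate-while-iterating count/filter loop by one frequency table
-- (counter dict) from which pairs and the kicker list are read off directly (objective: simpler).
-- Equivalence is about the return value; neither version mutates the caller's list.

-- ===== PORT A =====
def getCardNumericValue (card : String) : Int × Char :=
  let c0 := (PySem.Str.pyGet? card 0).getD ' '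
  let c1 := (PySem.Str.pyGet? card 1).getD ' '
  if c0 = 'A' then (14, c1)
  else if c0 = 'J' then (11, c1)
  else if c0 = 'Q' then (12, c1)
  else if c0 = 'K' then (13, c1)
  else ((PySem.Int.ofChars? [c0]).getD 0, c1)

def getSortedRanks (cards : List String) : List Int :=
  let cards1 := cards.map getCardNumericValue
  let cards2 := cards1.map (fun x => x.1)
  PySem.List.sorted cards2 (fun x => x) false

def twoPairScore (cards : List String) : List Int :=
  let returnList : List Int := []
  let ranks := (getSortedRanks cards).reverse
  -- 'for card in cards:' iterates over the list object built above; the rebinding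
  -- 'cards=[x for x in cards if x != card]' only changes what 'cards' names (state .2)
  let st := ranks.foldl
    (fun (st : List Int × List Int) card =>
      if PySem.List.count st.2 card = 2 then
        (st.1 ++ [card], st.2.filter (fun x => x != card))
      else st)
    (returnList, ranks)
  st.1 ++ [PySem.List.pyGetD st.2 0 0]

-- ===== PORT B =====
def rankOfCard (card : String) : Int :=
  let c := (PySem.Str.pyGet? card 0).getD ' '
  if c = 'A' then 14
  else if c = 'K' then 13
  else if c = 'Q' then 12
  else if c = 'J' then 11
  else (PySem.Int.ofChars? [c]).getD 0

def twoPairScore_alt (cards : List String) : List Int :=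
  let ranks := PySem.List.sorted (cards.map rankOfCard) (fun x => x) true
  let freq := ranks.foldl (fun d v => d.insert v (d.getD v 0 + 1))
    (PySem.Dict.empty : PySem.Dict Int Int)
  let pairs := freq.keys.filter (fun v => freq.getD v 0 == 2)
  let remaining := ranks.filter (fun v => freq.getD v 0 != 2)
  pairs ++ [PySem.List.pyGetD remaining 0 0]

-- ===== PRECONDITION & SPEC =====
-- Pre_ excludes exactly the inputs where Python A raises: a card too short or whose first
-- character is not a rank character (IndexError / ValueError), and hands in which every rank
-- occurs exactly twice (including the empty hand), where the final cards[0] is an IndexError.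
def pvCardRank? (card : String) : Option Int :=
  match card.toList with
  | a :: _ :: _ =>
      if a = 'A' then some 14 else if a = 'J' then some 11
      else if a = 'Q' then some 12 else if a = 'K' then some 13
      else if a.isDigit then some ((a.toNat : Int) - 48) else none
  | _ => none

def Pre_twoPairScore (cards : List String) : Prop :=
  (∀ c ∈ cards, (pvCardRank? c).isSome) ∧
  (cards.filterMap pvCardRank?).any
    (fun v => (cards.filterMap pvCardRank?).count v ≠ 2)
instance (cards : List String) : Decidable (Pre_twoPairScore cards) := by
  unfold Pre_twoPairScore; infer_instance

def pvWitness_twoPairScore : List String := ["As", "Ah", "Kd", "Qc", "2s"]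

def Spec_twoPairScore (cards : List String) (out : List Int) : Prop := out = twoPairScore_alt cards
instance (cards : List String) (out : List Int) : Decidable (Spec_twoPairScore cards out) := by unfold Spec_twoPairScore; infer_instance

-- ===== CLAIM (what is proved, stated in full; the proofs are below) =====
def Claim_equal_twoPairScore : Prop := ∀ (cards : List String), Dom_twoPairScore cards → Pre_twoPairScore cards → Spec_twoPairScore cards (twoPairScore cards)

-- ===== LEMMAS AND PROOFS =====

theorem rank_eq (c : String) : rankOfCard c = (getCardNumericValue c).1 := by
  simp only [rankOfCard, getCardNumericValue]
  split_ifs <;> simp_all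

theorem sorted_rev_eq_reverse_sorted (xs : List Int) :
    PySem.List.sorted xs (fun x => x) true = (PySem.List.sorted xs (fun x => x) false).reverse := by
  refine List.Perm.eq_of_pairwise (le := fun a b : Int => b ≤ a)
    (fun a b _ _ h1 h2 => le_antisymm h2 h1)
    (PySem.List.sorted_pairwise_rev xs _)
    ((List.pairwise_reverse).mpr (PySem.List.sorted_pairwise xs (fun x => x)))
    ((PySem.List.sorted_perm xs _ true).trans
      ((PySem.List.sorted_perm xs _ false).symm.trans (List.reverse_perm _).symm))

/-- first occurrences of elements of the list that are not in `seen`, in order -/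
def firstNew (seen : List Int) : List Int → List Int
  | [] => []
  | a :: s => if a ∈ seen then firstNew seen s else a :: firstNew (seen ++ [a]) s

theorem foldl_add_eq_firstNew (S seen : List Int) :
    S.foldl PySem.Set.add seen = seen ++ firstNew seen S := by
  induction S generalizing seen with
  | nil => simp [firstNew]
  | cons a s ih =>
    by_cases h : a ∈ seen <;>
      simp [firstNew, h, PySem.Set.add_of_mem, PySem.Set.add_of_not_mem, ih]

/-- the pair ranks A's loop appends while scanning `S`, having already appended `rl` -/
def newPairs (R rl : List Int) : List Int → List Int
  | [] => []
  | a :: s =>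
      if PySem.List.count R a = 2 ∧ a ∉ rl then a :: newPairs R (rl ++ [a]) s
      else newPairs R rl s

theorem mem_newPairs (R : List Int) (S : List Int) : ∀ rl x,
    (x ∈ newPairs R rl S ↔ PySem.List.count R x = 2 ∧ x ∈ S ∧ x ∉ rl) := by
  induction S with
  | nil => simp [newPairs]
  | cons a s ih =>
    intro rl x
    by_cases h : PySem.List.count R a = 2 ∧ a ∉ rl
    · simp only [newPairs, if_pos h, List.mem_cons, ih]
      constructor
      · rintro (rfl | ⟨h2, hs, hn⟩)
        · exact ⟨h.1, Or.inl rfl, h.2⟩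
        · simp at hn; exact ⟨h2, Or.inr hs, hn.1⟩
      · rintro ⟨h2, (rfl | hs), hn⟩
        · exact Or.inl rfl
        · by_cases hxa : x = a
          · exact Or.inl hxa
          · exact Or.inr ⟨h2, hs, by simp [hn, hxa]⟩
    · simp only [newPairs, if_neg h, List.mem_cons, ih]
      constructor
      · rintro ⟨h2, hs, hn⟩; exact ⟨h2, Or.inr hs, hn⟩
      · rintro ⟨h2, (rfl | hs), hn⟩
        · exact absurd ⟨h2, hn⟩ h
        · exact ⟨h2, hs, hn⟩

theorem newPairs_eq_filter_firstNew (R : List Int) (S : List Int) : ∀ rl seen,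
    (∀ x, PySem.List.count R x = 2 → (x ∈ rl ↔ x ∈ seen)) →
    newPairs R rl S = (firstNew seen S).filter (fun v => decide (PySem.List.count R v = 2)) := by
  induction S with
  | nil => intro rl seen _; simp [newPairs, firstNew]
  | cons a s ih =>
    intro rl seen h
    by_cases h2 : PySem.List.count R a = 2
    · by_cases hin : a ∈ rl
      · have hseen : a ∈ seen := (h a h2).mp hin
        have hnp : newPairs R rl (a :: s) = newPairs R rl s := by
          simp only [newPairs]; rw [if_neg (fun hcon => hcon.2 hin)]
        have hfn : firstNew seen (a :: s) = firstNew seen s := by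
          simp only [firstNew]; rw [if_pos hseen]
        rw [hnp, hfn]; exact ih rl seen h
      · have hseen : a ∉ seen := fun hs => hin ((h a h2).mpr hs)
        have hnp : newPairs R rl (a :: s) = a :: newPairs R (rl ++ [a]) s := by
          simp only [newPairs]; rw [if_pos ⟨h2, hin⟩]
        have hfn : firstNew seen (a :: s) = a :: firstNew (seen ++ [a]) s := by
          simp only [firstNew]; rw [if_neg hseen]
        rw [hnp, hfn, List.filter_cons, if_pos (by simp only [PySem.List.count_eq] at h2; simp [h2])]
        congr 1
        exact ih (rl ++ [a]) (seen ++ [a]) (by intro x hx; simp [h x hx])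
    · have hnp : newPairs R rl (a :: s) = newPairs R rl s := by
        simp only [newPairs]; rw [if_neg (fun hcon => h2 hcon.1)]
      by_cases hseen : a ∈ seen
      · have hfn : firstNew seen (a :: s) = firstNew seen s := by
          simp only [firstNew]; rw [if_pos hseen]
        rw [hnp, hfn]; exact ih rl seen h
      · have hfn : firstNew seen (a :: s) = a :: firstNew (seen ++ [a]) s := by
          simp only [firstNew]; rw [if_neg hseen]
        rw [hnp, hfn, List.filter_cons, if_neg (by simp only [PySem.List.count_eq] at h2; simp [h2])]
        exact ih rl (seen ++ [a]) (by
          intro x hx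
          have hxa : x ≠ a := fun he => h2 (he ▸ hx)
          simp [h x hx, hxa])

theorem loop_inv (R : List Int) (S : List Int) : ∀ rl,
    (∀ x ∈ rl, PySem.List.count R x = 2) →
    S.foldl
      (fun (st : List Int × List Int) card =>
        if PySem.List.count st.2 card = 2 then
          (st.1 ++ [card], st.2.filter (fun x => x != card))
        else st)
      (rl, R.filter (fun x => decide (x ∉ rl))) =
    (rl ++ newPairs R rl S, R.filter (fun x => decide (x ∉ rl ++ newPairs R rl S))) := by
  induction S with
  | nil => intro rl _; simp [newPairs]
  | cons a s ih =>
    intro rl hrl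
    have hcount : PySem.List.count (R.filter (fun x => decide (x ∉ rl))) a
        = if a ∉ rl then PySem.List.count R a else 0 := by
      simp only [PySem.List.count_eq]
      by_cases h : a ∈ rl
      · rw [if_neg (by simp [h])]
        exact List.count_eq_zero.mpr (by simp [h])
      · rw [if_pos h]
        exact List.count_filter (by simp [h])
    simp only [List.foldl_cons]
    by_cases hc : PySem.List.count R a = 2 ∧ a ∉ rl
    · have hcond : PySem.List.count (R.filter (fun x => decide (x ∉ rl))) a = 2 := by
        rw [hcount, if_pos hc.2]; exact hc.1
      rw [if_pos hcond]
      have hfilt : (R.filter (fun x => decide (x ∉ rl))).filter (fun x => x != a)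
          = R.filter (fun x => decide (x ∉ rl ++ [a])) := by
        rw [List.filter_filter]
        apply List.filter_congr
        intro x _
        by_cases hx : x ∈ rl <;> by_cases hxa : x = a <;> simp [hx, hxa]
      have harg : ∀ x ∈ rl ++ [a], PySem.List.count R x = 2 := by
        intro x hx
        rcases List.mem_append.mp hx with h | h
        · exact hrl x h
        · simp at h; exact h ▸ hc.1
      have hnp : newPairs R rl (a :: s) = a :: newPairs R (rl ++ [a]) s := by
        simp only [newPairs]; rw [if_pos hc]
      rw [hfilt, ih (rl ++ [a]) harg, hnp]
      simp [List.append_assoc]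
    · have hcond : ¬ PySem.List.count (R.filter (fun x => decide (x ∉ rl))) a = 2 := by
        rw [hcount]
        by_cases h : a ∈ rl
        · rw [if_neg (by simp [h])]; simp
        · rw [if_pos h]; exact fun h2 => hc ⟨h2, h⟩
      have hnp : newPairs R rl (a :: s) = newPairs R rl s := by
        simp only [newPairs]; rw [if_neg hc]
      rw [if_neg hcond, ih rl hrl, hnp]

theorem loopA_eq (R : List Int) :
    R.foldl
      (fun (st : List Int × List Int) card =>
        if PySem.List.count st.2 card = 2 then
          (st.1 ++ [card], st.2.filter (fun x => x != card))
        else st) ([], R)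
      = (newPairs R [] R, R.filter (fun x => decide (x ∉ newPairs R [] R))) := by
  have h := loop_inv R R [] (by simp)
  simpa using h

theorem counter_getD (R : List Int) (v : Int) :
    (R.foldl (fun d x => d.insert x (d.getD x 0 + 1))
      (PySem.Dict.empty : PySem.Dict Int Int)).getD v 0 = (List.count v R : Int) := by
  rw [PySem.Dict.foldl_insert_getD_add_one_eq_counter, PySem.Dict.getD_counter]

theorem counter_keys (R : List Int) :
    (R.foldl (fun d x => d.insert x (d.getD x 0 + 1))
      (PySem.Dict.empty : PySem.Dict Int Int)).keys = firstNew [] R := by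
  rw [PySem.Dict.foldl_insert_getD_add_one_eq_counter, PySem.Dict.keys_counter,
    PySem.Set.ofList_eq_foldl, foldl_add_eq_firstNew]
  simp

theorem twoPairScore_eq (cards : List String) : twoPairScore cards = twoPairScore_alt cards := by
  have hranks : cards.map rankOfCard = (cards.map getCardNumericValue).map (fun x => x.1) := by
    simp only [List.map_map]
    exact List.map_congr_left (fun c _ => rank_eq c)
  simp only [twoPairScore, twoPairScore_alt, getSortedRanks, hranks, sorted_rev_eq_reverse_sorted]
  generalize (PySem.List.sorted ((cards.map getCardNumericValue).map (fun x => x.1)) (fun x => x) false).reverse = R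
  rw [loopA_eq R]
  have hpairs : (R.foldl (fun d v => d.insert v (d.getD v 0 + 1))
        (PySem.Dict.empty : PySem.Dict Int Int)).keys.filter
        (fun v => (R.foldl (fun d v => d.insert v (d.getD v 0 + 1))
          (PySem.Dict.empty : PySem.Dict Int Int)).getD v 0 == 2)
      = (firstNew [] R).filter (fun v => decide (PySem.List.count R v = 2)) := by
    rw [counter_keys]
    refine List.filter_congr (fun x _ => ?_)
    rw [counter_getD]
    by_cases h : List.count x R = 2 <;> simp [PySem.List.count_eq, h] <;> omega
  have hrem : R.filter (fun x => decide (x ∉ newPairs R [] R))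
      = R.filter (fun v => ((R.foldl (fun d v => d.insert v (d.getD v 0 + 1))
          (PySem.Dict.empty : PySem.Dict Int Int)).getD v 0 != 2)) := by
    refine List.filter_congr (fun x hx => ?_)
    rw [counter_getD]
    by_cases h : List.count x R = 2 <;>
      simp [mem_newPairs, PySem.List.count_eq, hx, h] <;> omega
  rw [hrem, newPairs_eq_filter_firstNew R R [] [] (fun x _ => Iff.rfl), hpairs]

-- ===== VERDICT (by name: the statement is the Claim_ definition above) =====
theorem twoPairScore_spec : Claim_equal_twoPairScore := by
  intro cards _ _
  unfold Spec_twoPairScore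
  exact twoPairScore_eq cards
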